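-- pv_equiv track=rewrite | github.com/alanyu19/fflip | fflip/ljpme/moreutil.py | combine_peak_foot_indexes
-- ===== SOURCE A (Python) =====
-- def combine_peak_foot_indexes(peak_indexes, foot_indexes):
--     assert 0 <= len(peak_indexes) - len(foot_indexes) <= 1
--     i = 0
--     comb = []
--     while i < len(peak_indexes) and i < len(foot_indexes):
--         comb.append(peak_indexes[i])
--         comb.append(foot_indexes[i])
--         i += 1
--     if i < len(peak_indexes):
--         comb.append(peak_indexes[i])
--     return comb
-- ===== SOURCE B (Python) =====
-- def combine_peak_foot_indexes(peak_indexes, foot_indexes):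
--     assert 0 <= len(peak_indexes) - len(foot_indexes) <= 1
--     return [peak_indexes[i // 2] if i % 2 == 0 else foot_indexes[i // 2]
--             for i in range(len(peak_indexes) + len(foot_indexes))]
-- ===== Notes on version B (the rewrite author's own statement) =====
-- stated objective: idiomatic
-- what changed: Replaces the index-tracking while loop with appends by a single closed-form comprehension over positions 0..n-1, reading element i from peak_indexes[i//2] or foot_indexes[i//2] by parity.
import Mathlib
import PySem

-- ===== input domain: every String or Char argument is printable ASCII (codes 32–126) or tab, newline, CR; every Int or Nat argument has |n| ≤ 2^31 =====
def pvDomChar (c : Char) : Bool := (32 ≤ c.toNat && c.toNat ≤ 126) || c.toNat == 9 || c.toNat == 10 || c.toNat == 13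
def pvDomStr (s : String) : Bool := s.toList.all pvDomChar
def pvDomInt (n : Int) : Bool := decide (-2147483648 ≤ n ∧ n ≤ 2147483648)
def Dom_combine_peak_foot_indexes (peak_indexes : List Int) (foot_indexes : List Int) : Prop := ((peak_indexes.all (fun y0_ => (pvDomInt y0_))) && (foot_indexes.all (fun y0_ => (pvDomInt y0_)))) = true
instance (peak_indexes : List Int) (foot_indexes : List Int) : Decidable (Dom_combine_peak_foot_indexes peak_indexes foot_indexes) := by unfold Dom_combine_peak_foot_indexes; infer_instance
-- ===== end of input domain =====

-- ===== PORT A =====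
-- while loop of A: index i, accumulator comb, appends pairwise then a trailing peak
def pvA_loop (p f : List Int) (i : Nat) (comb : List Int) : List Int :=
  if i < p.length ∧ i < f.length then
    pvA_loop p f (i + 1) (comb ++ [p.getD i 0, f.getD i 0])
  else if i < p.length then comb ++ [p.getD i 0] else comb
termination_by p.length - i
decreasing_by omega

def combine_peak_foot_indexes (peak_indexes : List Int) (foot_indexes : List Int) : List Int :=
  pvA_loop peak_indexes foot_indexes 0 []

-- ===== PORT B =====
def combine_peak_foot_indexes_alt (peak_indexes : List Int) (foot_indexes : List Int) : List Int :=
  (List.range (peak_indexes.length + foot_indexes.length)).map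
    (fun i => if i % 2 = 0 then peak_indexes.getD (i / 2) 0 else foot_indexes.getD (i / 2) 0)

-- ===== PRECONDITION & SPEC =====
-- Pre_ excludes exactly the inputs on which A's assert fails (AssertionError):
-- it requires len(foot) <= len(peak) <= len(foot)+1.
def Pre_combine_peak_foot_indexes (peak_indexes : List Int) (foot_indexes : List Int) : Prop :=
  foot_indexes.length <= peak_indexes.length ∧ peak_indexes.length <= foot_indexes.length + 1
instance (peak_indexes : List Int) (foot_indexes : List Int) : Decidable (Pre_combine_peak_foot_indexes peak_indexes foot_indexes) := by unfold Pre_combine_peak_foot_indexes; infer_instance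
def pvWitness_combine_peak_foot_indexes : List Int × List Int := ([1, 5, 9], [3, 7])

def Spec_combine_peak_foot_indexes (peak_indexes : List Int) (foot_indexes : List Int) (out : List Int) : Prop := out = combine_peak_foot_indexes_alt peak_indexes foot_indexes
instance (peak_indexes : List Int) (foot_indexes : List Int) (out : List Int) : Decidable (Spec_combine_peak_foot_indexes peak_indexes foot_indexes out) := by unfold Spec_combine_peak_foot_indexes; infer_instance

-- ===== CLAIM (what is proved, stated in full; the proofs are below) =====
def Claim_equal_combine_peak_foot_indexes : Prop := ∀ (peak_indexes : List Int) (foot_indexes : List Int), Dom_combine_peak_foot_indexes peak_indexes foot_indexes → Pre_combine_peak_foot_indexes peak_indexes foot_indexes → Spec_combine_peak_foot_indexes peak_indexes foot_indexes (combine_peak_foot_indexes peak_indexes foot_indexes)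

-- ===== LEMMAS AND PROOFS =====

-- interleave: the common mathematical shape both ports compute
def pvInter : List Int → List Int → List Int
  | [], _ => []
  | a :: _, [] => [a]
  | a :: p, b :: f => a :: b :: pvInter p f

theorem pvA_loop_eq (p f : List Int) (i : Nat) (comb : List Int)
    (h : p.length ≤ f.length + 1) :
    pvA_loop p f i comb = comb ++ pvInter (p.drop i) (f.drop i) := by
  unfold pvA_loop
  split
  · rename_i hlt
    rw [pvA_loop_eq p f (i+1) _ h]
    have hp : i < p.length := hlt.1
    have hf : i < f.length := hlt.2
    rw [List.drop_eq_getElem_cons hp, List.drop_eq_getElem_cons hf]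
    simp [pvInter, List.getD_eq_getElem?_getD, List.getElem?_eq_getElem hp,
      List.getElem?_eq_getElem hf]
  · rename_i hne
    split
    · rename_i hp
      have hf : f.length ≤ i := by omega
      have hp1 : p.length ≤ i + 1 := by omega
      rw [List.drop_eq_getElem_cons hp]
      have : p.drop (i+1) = [] := List.drop_eq_nil_of_le hp1
      rw [this]
      have : f.drop i = [] := List.drop_eq_nil_of_le hf
      rw [this]
      simp [pvInter, List.getD_eq_getElem?_getD, List.getElem?_eq_getElem hp]
    · rename_i hp
      have : p.drop i = [] := List.drop_eq_nil_of_le (by omega)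
      rw [this]
      simp [pvInter]
termination_by p.length - i
decreasing_by omega

theorem pvAlt_eq (p f : List Int) (h1 : f.length ≤ p.length) (h2 : p.length ≤ f.length + 1) :
    combine_peak_foot_indexes_alt p f = pvInter p f := by
  unfold combine_peak_foot_indexes_alt
  induction f generalizing p with
  | nil =>
    match p, h1, h2 with
    | [], _, _ => simp [pvInter]
    | [a], _, _ => simp [pvInter, List.range_succ]
  | cons b f ih =>
    match p, h1, h2 with
    | a :: p, h1, h2 =>
      have h1' : f.length ≤ p.length := by simpa using h1
      have h2' : p.length ≤ f.length + 1 := by simpa using h2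
      have := ih p h1' h2'
      unfold combine_peak_foot_indexes_alt at this
      simp only [List.length_cons]
      have hn : p.length + 1 + (f.length + 1) = p.length + f.length + 1 + 1 := by omega
      rw [hn]
      rw [List.range_succ_eq_map, List.range_succ_eq_map]
      simp only [List.map_cons, List.map_map]
      have htail : List.map ((fun i => if i % 2 = 0 then (a :: p).getD (i / 2) 0
            else (b :: f).getD (i / 2) 0) ∘ Nat.succ ∘ Nat.succ)
          (List.range (p.length + f.length)) = pvInter p f := by
        rw [← this]
        apply List.map_congr_left
        intro x _
        simp only [Function.comp, Nat.succ_eq_add_one]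
        have hm : (x + 1 + 1) % 2 = x % 2 := by omega
        have hd : (x + 1 + 1) / 2 = x / 2 + 1 := by omega
        rw [hm, hd]
        by_cases hx : x % 2 = 0 <;> simp [hx]
      rw [htail]
      simp [pvInter]

-- ===== VERDICT (by name: the statement is the Claim_ definition above) =====
theorem combine_peak_foot_indexes_spec : Claim_equal_combine_peak_foot_indexes := by
  intro p f _ hpre
  unfold Spec_combine_peak_foot_indexes combine_peak_foot_indexes
  rw [pvA_loop_eq p f 0 [] hpre.2, pvAlt_eq p f hpre.1 hpre.2]
  simp
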